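-- pv_equiv track=rewrite | github.com/HosseinOutward/FoundationsOfAlgorithms_SBU_Course | Minds/United Minds.py | f
-- ===== SOURCE A (Python) =====
-- def f(left, right):
--     cost = 0
--     for r in right:
--         for l in left:
--             if r[0] > l[0]:
--                 cost+=r[0]-l[0]
--             else:
--                 break
--     return cost
-- ===== SOURCE B (Python) =====
-- def f(left, right):
--     # Return value only; O((n+m) log n) via prefix sums + strict prefix-maxima + binary search.
--     ms = [l[0] for l in left]
--     prefix = [0]
--     for v in ms:
--         prefix.append(prefix[-1] + v)
--     recs = []  # (value, index) pairs where the running maximum of ms strictly increases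
--     for i, v in enumerate(ms):
--         if not recs or v > recs[-1][0]:
--             recs.append((v, i))
--     n = len(ms)
--     cost = 0
--     for r in right:
--         v = r[0]
--         lo, hi = 0, len(recs)
--         while lo < hi:
--             mid = (lo + hi) // 2
--             if recs[mid][0] >= v:
--                 hi = mid
--             else:
--                 lo = mid + 1
--         k = recs[lo][1] if lo < len(recs) else n
--         cost += v * k - prefix[k]
--     return cost
-- ===== Notes on version B (the rewrite author's own statement) =====
-- stated objective: alternative
-- what changed: Replaces the nested scan (for each right row, walk left until the break) by one pass building prefix sums and the strict prefix-maxima records of left, then answers each right row with a binary search over the records (the break point of A's inner loop is the first record value >= r[0]); trades A's early-exit rescans for precomputed structures.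
-- outside the precondition, e.g. on f([[1], []], []): A returns 0, B raises IndexError; on f([[5], []], [[3]]): A returns 0, B raises IndexError
import Mathlib
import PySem

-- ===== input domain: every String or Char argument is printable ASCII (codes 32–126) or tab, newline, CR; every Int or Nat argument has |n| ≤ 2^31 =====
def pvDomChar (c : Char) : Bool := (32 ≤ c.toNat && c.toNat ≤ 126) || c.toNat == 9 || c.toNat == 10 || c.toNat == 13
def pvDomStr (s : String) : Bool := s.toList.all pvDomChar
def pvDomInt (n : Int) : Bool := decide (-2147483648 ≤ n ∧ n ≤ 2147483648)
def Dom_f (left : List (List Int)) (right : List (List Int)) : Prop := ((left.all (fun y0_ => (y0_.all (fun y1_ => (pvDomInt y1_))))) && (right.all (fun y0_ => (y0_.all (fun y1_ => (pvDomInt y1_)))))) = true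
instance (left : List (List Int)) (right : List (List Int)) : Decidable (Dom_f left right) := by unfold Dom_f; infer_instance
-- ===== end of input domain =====

-- B replaces A's nested scan by prefix sums + prefix-maxima records + binary search; return-value equivalence.

-- ===== PORT A =====
-- inner loop 'for l in left: if r[0] > l[0]: cost += r[0]-l[0] else: break'
-- (l[0] ported as l.headD 0: rows are nonempty under Pre_f)
def fInner (v : Int) : List (List Int) → Int
  | [] => 0
  | l :: rest => if v > l.headD 0 then (v - l.headD 0) + fInner v rest else 0

def f (left : List (List Int)) (right : List (List Int)) : Int :=
  right.foldl (fun cost r => cost + fInner (r.headD 0) left) 0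

-- ===== PORT B =====
-- the 'while lo < hi' binary search of Source B
def fBsearch (recs : List (Int × Int)) (v : Int) (lo hi : Nat) : Nat :=
  if h : lo < hi then
    if v ≤ (recs.getD ((lo + hi) / 2) (0, 0)).1 then fBsearch recs v lo ((lo + hi) / 2)
    else fBsearch recs v ((lo + hi) / 2 + 1) hi
  else lo
termination_by hi - lo
decreasing_by all_goals omega

def f_alt (left : List (List Int)) (right : List (List Int)) : Int :=
  let ms := left.map (fun l => l.headD 0)   -- [l[0] for l in left]; rows nonempty under Pre_f
  let prefix_ := ms.foldl (fun p v => p ++ [PySem.List.pyGetD p (-1) 0 + v]) [0]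
  let recs := (PySem.List.enumerate ms 0).foldl
    (fun rs iv =>
      if rs = [] ∨ (PySem.List.pyGetD rs (-1) ((0 : Int), (0 : Int))).1 < iv.2
      then rs ++ [(iv.2, iv.1)] else rs) []
  let n : Int := ms.length
  right.foldl (fun cost r =>
    let v := r.headD 0
    let lo := fBsearch recs v 0 recs.length
    let k : Int := if lo < recs.length then (recs.getD lo (0, 0)).2 else n
    cost + (v * k - PySem.List.pyGetD prefix_ k 0)) 0

-- ===== PRECONDITION & SPEC =====
-- Pre_f excludes inputs holding an empty row: on rows A reaches it raises IndexError; an empty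
-- row of left past A's break point (or with right = []) is never reached by A (A returns 0 there)
-- but B's single pass over left still reads it and raises.
def Pre_f (left : List (List Int)) (right : List (List Int)) : Prop :=
  (∀ l ∈ left, l ≠ []) ∧ (∀ r ∈ right, r ≠ [])
instance (left : List (List Int)) (right : List (List Int)) : Decidable (Pre_f left right) := by
  unfold Pre_f; infer_instance

def pvWitness_f : List (List Int) × List (List Int) := ([[1], [3]], [[2], [5]])

def Spec_f (left : List (List Int)) (right : List (List Int)) (out : Int) : Prop := out = f_alt left right
instance (left : List (List Int)) (right : List (List Int)) (out : Int) : Decidable (Spec_f left right out) := by unfold Spec_f; infer_instance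

-- ===== CLAIM (what is proved, stated in full; the proofs are below) =====
def Claim_equal_f : Prop := ∀ (left : List (List Int)) (right : List (List Int)), Dom_f left right → Pre_f left right → Spec_f left right (f left right)

-- ===== LEMMAS AND PROOFS =====


def recsFrom (b : Int) (i : Int) : List Int → List (Int × Int)
  | [] => []
  | e :: es => if b < e then (e, i) :: recsFrom e (i + 1) es else recsFrom b (i + 1) es

def recsTop (i : Int) : List Int → List (Int × Int)
  | [] => []
  | e :: es => (e, i) :: recsFrom e (i + 1) es

def partials (a : Int) : List Int → List Int
  | [] => []
  | e :: es => (a + e) :: partials (a + e) es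

theorem recs_fold_ne (ms : List Int) : ∀ (i : Int) (acc : List (Int × Int)) (b : Int)
    (h : acc ≠ []), (acc.getLast h).1 = b →
    (PySem.List.enumerate ms i).foldl
      (fun rs iv =>
        if rs = [] ∨ (PySem.List.pyGetD rs (-1) ((0 : Int), (0 : Int))).1 < iv.2
        then rs ++ [(iv.2, iv.1)] else rs) acc
    = acc ++ recsFrom b i ms := by
  induction ms with
  | nil => intro i acc b h hb; simp [recsFrom, PySem.List.enumerate]
  | cons e es ih =>
    intro i acc b h hb
    rw [PySem.List.enumerate_cons, List.foldl_cons]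
    by_cases hlt : b < e
    · have hcond : (if acc = [] ∨ (PySem.List.pyGetD acc (-1) ((0 : Int), (0 : Int))).1 < e
          then acc ++ [(e, i)] else acc) = acc ++ [(e, i)] := by
        rw [if_pos]; right; rw [PySem.List.pyGetD_neg_one acc ((0 : Int), (0 : Int)) h, hb]; exact hlt
      simp only [hcond]
      rw [ih (i + 1) (acc ++ [(e, i)]) e (by simp) (by simp)]
      simp [recsFrom, hlt]
    · have hcond : (if acc = [] ∨ (PySem.List.pyGetD acc (-1) ((0 : Int), (0 : Int))).1 < e
          then acc ++ [(e, i)] else acc) = acc := by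
        rw [if_neg]; push Not
        exact ⟨h, by rw [PySem.List.pyGetD_neg_one acc ((0 : Int), (0 : Int)) h, hb]; exact not_lt.mp hlt⟩
      simp only [hcond]
      rw [ih (i + 1) acc b h hb]
      simp [recsFrom, hlt]

theorem recs_fold_nil (ms : List Int) (i : Int) :
    (PySem.List.enumerate ms i).foldl
      (fun rs iv =>
        if rs = [] ∨ (PySem.List.pyGetD rs (-1) ((0 : Int), (0 : Int))).1 < iv.2
        then rs ++ [(iv.2, iv.1)] else rs) []
    = recsTop i ms := by
  cases ms with
  | nil => simp [recsTop, PySem.List.enumerate]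
  | cons e es =>
    rw [PySem.List.enumerate_cons, List.foldl_cons]
    have hcond : (if ([] : List (Int × Int)) = [] ∨
        (PySem.List.pyGetD ([] : List (Int × Int)) (-1) ((0 : Int), (0 : Int))).1 < e
        then ([] : List (Int × Int)) ++ [(e, i)] else []) = [(e, i)] := by simp
    rw [hcond, recs_fold_ne es (i + 1) [(e, i)] e (by simp) (by simp)]
    simp [recsTop]

theorem partials_fold (ms : List Int) : ∀ (acc : List Int) (h : acc ≠ []),
    ms.foldl (fun p v => p ++ [PySem.List.pyGetD p (-1) 0 + v]) acc
      = acc ++ partials (acc.getLast h) ms := by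
  induction ms with
  | nil => intro acc h; simp [partials]
  | cons e es ih =>
    intro acc h
    rw [List.foldl_cons, PySem.List.pyGetD_neg_one acc 0 h,
      ih (acc ++ [acc.getLast h + e]) (by simp)]
    simp [partials]

theorem partials_getD (ms : List Int) : ∀ (a : Int) (k : Nat), k ≤ ms.length →
    ((a :: partials a ms).getD k 0) = a + (ms.take k).sum := by
  induction ms with
  | nil =>
    intro a k hk
    have hk0 : k = 0 := by simpa using hk
    subst hk0; simp [partials]
  | cons e es ih =>
    intro a k hk
    cases k with
    | zero => simp
    | succ j =>
      simp only [partials, List.getD_cons_succ, List.take_succ_cons, List.sum_cons]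
      rw [ih (a + e) j (by simpa using hk)]
      ring




theorem recsFrom_main (ms : List Int) : ∀ (b i v : Int) (r : Nat), b < v →
    r ≤ (recsFrom b i ms).length →
    (∀ j, j < r → ((recsFrom b i ms).getD j (0,0)).1 < v) →
    (r < (recsFrom b i ms).length → v ≤ ((recsFrom b i ms).getD r (0,0)).1) →
    (if r < (recsFrom b i ms).length then ((recsFrom b i ms).getD r (0,0)).2
     else i + ms.length)
      = i + ((ms.takeWhile (fun e => decide (e < v))).length : Int) := by
  induction ms with
  | nil =>
    intro b i v r hbv hr hlt hge
    simp only [recsFrom, List.length_nil, List.takeWhile_nil] at *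
    simp
  | cons e es ih =>
    intro b i v r hbv hr hlt hge
    by_cases hbe : b < e
    · simp only [recsFrom, if_pos hbe] at hr hlt hge ⊢
      by_cases hve : v ≤ e
      · -- head record already ≥ v : r must be 0, break index is i
        have hr0 : r = 0 := by
          by_contra hne
          have := hlt 0 (by omega)
          simp at this
          omega
        subst hr0
        rw [if_pos (by simp), List.takeWhile_cons_of_neg (by simp; omega)]
        simp
      · -- e < v : peel the head record and recurse
        have hev : e < v := by omega
        have hr1 : 1 ≤ r := by
          by_contra hne
          have h0 : r = 0 := by omega
          subst h0
          have := hge (by simp)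
          simp at this
          omega
        obtain ⟨r', rfl⟩ : ∃ r', r = r' + 1 := ⟨r - 1, by omega⟩
        have hmain := ih e (i + 1) v r' hev
          (by simpa using hr)
          (fun j hj => by simpa using hlt (j + 1) (by omega))
          (fun h => by simpa using hge (by simpa using h))
        rw [List.takeWhile_cons_of_pos (by simp; omega)]
        simp only [List.length_cons, List.getD_cons_succ]
        split
        · rw [if_pos (by omega)] at hmain
          push_cast at hmain ⊢; omega
        · rw [if_neg (by omega)] at hmain
          push_cast at hmain ⊢; omega
    · -- e ≤ b < v : head is not a record but still < v
      have hev : e < v := by omega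
      simp only [recsFrom, if_neg hbe] at hr hlt hge ⊢
      have hmain := ih b (i + 1) v r hbv hr hlt hge
      rw [List.takeWhile_cons_of_pos (by simp; omega)]
      simp only [List.length_cons]
      split
      · rw [if_pos (by assumption)] at hmain
        push_cast at hmain ⊢; omega
      · rw [if_neg (by assumption)] at hmain
        push_cast at hmain ⊢; omega

theorem recsTop_main (ms : List Int) (i v : Int) (r : Nat)
    (hr : r ≤ (recsTop i ms).length)
    (hlt : ∀ j, j < r → ((recsTop i ms).getD j (0,0)).1 < v)
    (hge : r < (recsTop i ms).length → v ≤ ((recsTop i ms).getD r (0,0)).1) :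
    (if r < (recsTop i ms).length then ((recsTop i ms).getD r (0,0)).2
     else i + ms.length)
      = i + ((ms.takeWhile (fun e => decide (e < v))).length : Int) := by
  cases ms with
  | nil =>
    simp only [recsTop, List.length_nil, List.takeWhile_nil] at *
    simp
  | cons e es =>
    simp only [recsTop] at hr hlt hge ⊢
    by_cases hve : v ≤ e
    · have hr0 : r = 0 := by
        by_contra hne
        have := hlt 0 (by omega)
        simp at this
        omega
      subst hr0
      rw [if_pos (by simp), List.takeWhile_cons_of_neg (by simp; omega)]
      simp
    · have hev : e < v := by omega
      have hr1 : 1 ≤ r := by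
        by_contra hne
        have h0 : r = 0 := by omega
        subst h0
        have := hge (by simp)
        simp at this
        omega
      obtain ⟨r', rfl⟩ : ∃ r', r = r' + 1 := ⟨r - 1, by omega⟩
      have hmain := recsFrom_main es e (i + 1) v r' hev
        (by simpa using hr)
        (fun j hj => by simpa using hlt (j + 1) (by omega))
        (fun h => by simpa using hge (by simpa using h))
      rw [List.takeWhile_cons_of_pos (by simp; omega)]
      simp only [List.length_cons, List.getD_cons_succ]
      split
      · rw [if_pos (by omega)] at hmain
        push_cast at hmain ⊢; omega
      · rw [if_neg (by omega)] at hmain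
        push_cast at hmain ⊢; omega

theorem fInner_closed (left : List (List Int)) (v : Int) :
    fInner v left =
      v * (((left.map (fun l => l.headD 0)).takeWhile (fun e => decide (e < v))).length : Int)
        - (((left.map (fun l => l.headD 0)).take
            ((left.map (fun l => l.headD 0)).takeWhile (fun e => decide (e < v))).length).sum) := by
  induction left with
  | nil => simp [fInner]
  | cons l rest ih =>
    simp only [fInner, List.map_cons]
    by_cases hv : v > l.headD 0
    · rw [if_pos hv, List.takeWhile_cons_of_pos (by simp only [decide_eq_true_eq]; omega)]
      simp only [List.length_cons, List.take_succ_cons, List.sum_cons]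
      rw [ih]; push_cast; ring
    · rw [if_neg hv, List.takeWhile_cons_of_neg (by simp only [decide_eq_true_eq]; omega)]
      simp


theorem recsFrom_gt (ms : List Int) : ∀ (b i : Int), ∀ p ∈ recsFrom b i ms, b < p.1 := by
  induction ms with
  | nil => intro b i p hp; simp [recsFrom] at hp
  | cons e es ih =>
    intro b i p hp
    simp only [recsFrom] at hp
    split at hp
    · rcases List.mem_cons.mp hp with h | h
      · subst h; assumption
      · exact lt_trans (by assumption) (ih e (i + 1) p h)
    · exact ih b (i + 1) p hp

theorem recsFrom_sorted (ms : List Int) : ∀ (b i : Int),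
    (recsFrom b i ms).Pairwise (fun p q => p.1 < q.1) := by
  induction ms with
  | nil => intro b i; simp [recsFrom]
  | cons e es ih =>
    intro b i
    simp only [recsFrom]
    split
    · exact List.pairwise_cons.mpr ⟨fun q hq => recsFrom_gt es e (i + 1) q hq, ih e (i + 1)⟩
    · exact ih b (i + 1)

theorem recsTop_sorted (ms : List Int) (i : Int) :
    (recsTop i ms).Pairwise (fun p q => p.1 < q.1) := by
  cases ms with
  | nil => simp [recsTop]
  | cons e es =>
    exact List.pairwise_cons.mpr ⟨fun q hq => recsFrom_gt es e (i + 1) q hq,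
      recsFrom_sorted es e (i + 1)⟩

theorem recs_mono_def (recs : List (Int × Int))
    (h : recs.Pairwise (fun p q => p.1 < q.1)) :
    ∀ j j', j ≤ j' → j' < recs.length → (recs.getD j (0,0)).1 ≤ (recs.getD j' (0,0)).1 := by
  intro j j' hjj hj'
  rcases Nat.lt_or_ge j j' with hlt | hge
  · rw [List.getD_eq_getElem _ _ (by omega), List.getD_eq_getElem _ _ hj']
    exact le_of_lt ((List.pairwise_iff_getElem.mp h) j j' (by omega) hj' hlt)
  · have : j = j' := by omega
    subst this; exact le_refl _

theorem fBsearch_spec (recs : List (Int × Int)) (v : Int)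
    (mono : ∀ j j', j ≤ j' → j' < recs.length → (recs.getD j (0,0)).1 ≤ (recs.getD j' (0,0)).1) :
    ∀ (n lo hi : Nat), hi - lo ≤ n → lo ≤ hi → hi ≤ recs.length →
    (∀ j, j < lo → (recs.getD j (0,0)).1 < v) →
    (∀ j, hi ≤ j → j < recs.length → v ≤ (recs.getD j (0,0)).1) →
    fBsearch recs v lo hi ≤ recs.length ∧
    (∀ j, j < fBsearch recs v lo hi → (recs.getD j (0,0)).1 < v) ∧
    (fBsearch recs v lo hi < recs.length → v ≤ (recs.getD (fBsearch recs v lo hi) (0,0)).1) := by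
  intro n
  induction n with
  | zero =>
    intro lo hi hn hle hlen hlo hhi
    have : lo = hi := by omega
    subst this
    rw [fBsearch, dif_neg (by omega)]
    exact ⟨hlen, hlo, fun h => hhi lo (le_refl _) h⟩
  | succ m ih =>
    intro lo hi hn hle hlen hlo hhi
    by_cases hlh : lo < hi
    · rw [fBsearch, dif_pos hlh]
      by_cases hv : v ≤ (recs.getD ((lo + hi) / 2) (0, 0)).1
      · rw [if_pos hv]
        exact ih lo ((lo + hi) / 2) (by omega) (by omega) (by omega)
          hlo
          (fun j hj1 hj2 => le_trans hv (mono ((lo + hi) / 2) j hj1 hj2))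
      · rw [if_neg hv]
        exact ih ((lo + hi) / 2 + 1) hi (by omega) (by omega) hlen
          (fun j hj => lt_of_le_of_lt
            (mono j ((lo + hi) / 2) (by omega) (by omega)) (not_le.mp hv))
          hhi
    · rw [fBsearch, dif_neg hlh]
      have : lo = hi := by omega
      subst this
      exact ⟨hlen, hlo, fun h => hhi lo (le_refl _) h⟩


-- the value 'k' computed by B's binary search is A's inner-loop break index
theorem break_index (ms : List Int) (v : Int) :
    (if fBsearch (recsTop 0 ms) v 0 (recsTop 0 ms).length < (recsTop 0 ms).length
     then (((recsTop 0 ms).getD (fBsearch (recsTop 0 ms) v 0 (recsTop 0 ms).length) (0,0)).2)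
     else (ms.length : Int))
    = ((ms.takeWhile (fun e => decide (e < v))).length : Int) := by
  have mono := recs_mono_def _ (recsTop_sorted ms 0)
  obtain ⟨h1, h2, h3⟩ := fBsearch_spec (recsTop 0 ms) v mono (recsTop 0 ms).length 0
    (recsTop 0 ms).length (by omega) (by omega) (le_refl _)
    (fun j hj => absurd hj (by omega)) (fun j hj1 hj2 => absurd hj2 (by omega))
  have hk := recsTop_main ms 0 v _ h1 h2 h3
  simpa using hk

-- ===== VERDICT (by name: the statement is the Claim_ definition above) =====
theorem f_spec : Claim_equal_f := by
  intro left right _ _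
  unfold Spec_f
  simp only [f, f_alt]
  rw [recs_fold_nil, partials_fold _ [0] (by simp)]
  simp only [break_index, List.getLast_singleton, List.singleton_append]
  rw [PySem.List.foldl_add, PySem.List.foldl_add]
  congr 1
  congr 1
  refine List.map_congr_left (fun r _ => ?_)
  rw [fInner_closed]
  rw [PySem.List.pyGetD_natCast,
    partials_getD _ 0 _ (((List.map (fun l => l.headD 0) left).takeWhile_sublist _).length_le)]
  ring
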